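-- pv_equiv track=rewrite | github.com/nmundboth/python_courseprojects | assignment3/assignment3.py | get_top_chirps
-- ===== SOURCE A (Python) =====
-- from typing import List, Dict, Tuple
--
-- def get_top_chirps( \
--         profile_dictionary: Dict[int, Tuple[str, List[int], List[int]]], \
--         chirp_dictionary: Dict[int, Tuple[int, str, List[str], List[int], List[int]]],
--         user_id: int)\
--         -> List[str]:
--     """
--     Returns a list of the most liked chirp for every user user_id follows.
--     See Page 3 Function 3 of th .pdf.
--     >>> profile_dictionary = create_profile_dictionary("profiles.txt")
--     >>> chirp_dictionary   = create_chirp_dictionary("chirps.txt")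
--     >>> get_top_chirps(profile_dictionary, chirp_dictionary, 300)
--     ["Actually nm. This isn't so bad lolz :P %StockholmeSyndrome"]
--     >>> get_top_chirps( profiles, chirps, 500 )
--     ['Make the ocean great again.',
--     'If some random dude offers to %ShowYouTheWorld do yourself a favour and %JustSayNo.',
--     'Does not want to build a %SnowMan %StopAsking']
--     """
--     lst = []
--     for key in profile_dictionary:
--         if key == user_id:
--             l = profile_dictionary[user_id][2]
--             for i in l:
--                 top_chirp(chirp_dictionary, i)
--                 if not(top_chirp(chirp_dictionary, i) == None):
--                     lst.append(top_chirp(chirp_dictionary, i))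
--     return lst
--
-- def top_chirp( \
--     chirp_dictionary: Dict[int, Tuple[int, str, List[str], List[int], List[int]]],
--         i: int)\
--         -> str:
--     e = 0
--     s = None
--     for k in chirp_dictionary:
--         if i == chirp_dictionary[k][0]:
--             tup = chirp_dictionary.get(k)
--             if len(tup[3]) >= e:
--                 e = len(tup[3])
--                 s = tup[1]
--     return s
-- ===== SOURCE B (Python) =====
-- def get_top_chirps(profile_dictionary, chirp_dictionary, user_id):
--     # One pass over all chirps building owner -> (like_count, text), keeping the
--     # last maximum (ties broken by >= as in the original), then one lookup per
--     # followed user.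
--     best = {}
--     for tup in chirp_dictionary.values():
--         owner = tup[0]
--         n = len(tup[3])
--         cur = best.get(owner)
--         if cur is None or n >= cur[0]:
--             best[owner] = (n, tup[1])
--     prof = profile_dictionary.get(user_id)
--     if prof is None:
--         return []
--     return [best[i][1] for i in prof[2] if i in best]
-- ===== Notes on version B (the rewrite author's own statement) =====
-- stated objective: alternative
-- what changed: Instead of rescanning the whole chirp dictionary once per followed user (helper top_chirp, called three times per user), B makes one pass over the chirps building an owner -> (like_count, text) best-chirp index with the same >=/last-max tie-break, then answers each followed user by a single lookup.
import Mathlib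
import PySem

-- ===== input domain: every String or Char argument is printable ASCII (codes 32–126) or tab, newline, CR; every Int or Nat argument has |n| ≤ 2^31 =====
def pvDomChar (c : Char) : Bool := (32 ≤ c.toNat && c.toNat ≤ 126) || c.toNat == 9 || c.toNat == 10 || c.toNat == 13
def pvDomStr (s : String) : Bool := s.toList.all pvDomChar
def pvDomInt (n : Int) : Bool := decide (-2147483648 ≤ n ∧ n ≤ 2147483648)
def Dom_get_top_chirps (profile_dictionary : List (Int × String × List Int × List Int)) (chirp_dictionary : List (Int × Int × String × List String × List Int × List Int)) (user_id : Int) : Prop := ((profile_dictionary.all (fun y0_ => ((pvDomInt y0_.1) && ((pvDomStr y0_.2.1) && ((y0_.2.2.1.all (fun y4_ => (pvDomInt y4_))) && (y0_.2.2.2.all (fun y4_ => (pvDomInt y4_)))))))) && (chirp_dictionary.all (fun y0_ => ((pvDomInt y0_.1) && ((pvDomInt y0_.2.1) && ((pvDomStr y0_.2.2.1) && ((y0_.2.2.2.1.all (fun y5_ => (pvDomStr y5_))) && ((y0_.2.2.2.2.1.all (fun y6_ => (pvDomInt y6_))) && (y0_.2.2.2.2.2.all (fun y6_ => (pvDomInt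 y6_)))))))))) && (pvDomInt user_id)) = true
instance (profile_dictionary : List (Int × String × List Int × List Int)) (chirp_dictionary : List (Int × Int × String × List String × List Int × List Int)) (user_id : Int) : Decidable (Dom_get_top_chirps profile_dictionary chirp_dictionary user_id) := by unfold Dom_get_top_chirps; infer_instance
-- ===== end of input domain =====

-- B replaces A's per-followed-user rescan of the chirp dictionary by one pass building an
-- owner -> best-chirp index (same >=/last-max tie-break) plus one lookup per followed user.

-- ===== PORT A =====
-- helper top_chirp: 'for k in chirp_dictionary: … chirp_dictionary[k]' iterates the dict's
-- items; ported as a fold over the (key, value) pairs, exact since dict keys are unique (Pre_).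
def top_chirp (chirp_dictionary : List (Int × Int × String × List String × List Int × List Int)) (i : Int) : Option String :=
  (chirp_dictionary.foldl
    (fun (es : Int × Option String) kv =>
      if i == kv.2.1 then
        if (kv.2.2.2.2.1.length : Int) ≥ es.1 then ((kv.2.2.2.2.1.length : Int), some kv.2.2.1)
        else es
      else es)
    (0, none)).2

def get_top_chirps (profile_dictionary : List (Int × String × List Int × List Int)) (chirp_dictionary : List (Int × Int × String × List String × List Int × List Int)) (user_id : Int) : List String :=
  profile_dictionary.foldl
    (fun lst kv =>
      if kv.1 == user_id then
        -- profile_dictionary[user_id]: first-match lookup (the 'none' arm is unreachable: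
        -- the loop just found the key)
        match (PySem.Dict.mk profile_dictionary).get? user_id with
        | some v =>
          v.2.2.foldl
            (fun lst i =>
              match top_chirp chirp_dictionary i with
              | some s => lst ++ [s]
              | none => lst) lst
        | none => lst
      else lst)
    []

-- ===== PORT B =====
-- one pass over the chirps: owner -> (like_count, text), keeping the last maximum (>=)
def bestChirps (chirp_dictionary : List (Int × Int × String × List String × List Int × List Int)) : PySem.Dict Int (Int × String) :=
  chirp_dictionary.foldl
    (fun d kv =>
      match d.get? kv.2.1 with
      | some cur =>
        if (kv.2.2.2.2.1.length : Int) ≥ cur.1 then d.insert kv.2.1 ((kv.2.2.2.2.1.length : Int), kv.2.2.1)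
        else d
      | none => d.insert kv.2.1 ((kv.2.2.2.2.1.length : Int), kv.2.2.1))
    PySem.Dict.empty

def get_top_chirps_alt (profile_dictionary : List (Int × String × List Int × List Int)) (chirp_dictionary : List (Int × Int × String × List String × List Int × List Int)) (user_id : Int) : List String :=
  let best := bestChirps chirp_dictionary
  match (PySem.Dict.mk profile_dictionary).get? user_id with
  | none => []
  | some prof => prof.2.2.filterMap (fun i => (best.get? i).map (·.2))

-- ===== PRECONDITION & SPEC =====
-- Pre_ excludes association lists with duplicate keys: both parameters are Python dicts,
-- which cannot hold a duplicate key, so such lists do not represent any actual input of A.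
def Pre_get_top_chirps (profile_dictionary : List (Int × String × List Int × List Int)) (chirp_dictionary : List (Int × Int × String × List String × List Int × List Int)) (user_id : Int) : Prop :=
  (profile_dictionary.map (·.1)).Nodup ∧ (chirp_dictionary.map (·.1)).Nodup
instance (profile_dictionary : List (Int × String × List Int × List Int)) (chirp_dictionary : List (Int × Int × String × List String × List Int × List Int)) (user_id : Int) : Decidable (Pre_get_top_chirps profile_dictionary chirp_dictionary user_id) := by unfold Pre_get_top_chirps; infer_instance

def pvWitness_get_top_chirps : (List (Int × String × List Int × List Int)) × (List (Int × Int × String × List String × List Int × List Int)) × Int :=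
  ([(1, "ann", [3], [2, 4])], [(10, 2, "hi", ["t"], [0, 0], []), (11, 2, "yo", [], [0], [])], 1)

def Spec_get_top_chirps (profile_dictionary : List (Int × String × List Int × List Int)) (chirp_dictionary : List (Int × Int × String × List String × List Int × List Int)) (user_id : Int) (out : List String) : Prop := out = get_top_chirps_alt profile_dictionary chirp_dictionary user_id
instance (profile_dictionary : List (Int × String × List Int × List Int)) (chirp_dictionary : List (Int × Int × String × List String × List Int × List Int)) (user_id : Int) (out : List String) : Decidable (Spec_get_top_chirps profile_dictionary chirp_dictionary user_id out) := by unfold Spec_get_top_chirps; infer_instance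

-- ===== CLAIM (what is proved, stated in full; the proofs are below) =====
def Claim_equal_get_top_chirps : Prop := ∀ (profile_dictionary : List (Int × String × List Int × List Int)) (chirp_dictionary : List (Int × Int × String × List String × List Int × List Int)) (user_id : Int), Dom_get_top_chirps profile_dictionary chirp_dictionary user_id → Pre_get_top_chirps profile_dictionary chirp_dictionary user_id → Spec_get_top_chirps profile_dictionary chirp_dictionary user_id (get_top_chirps profile_dictionary chirp_dictionary user_id)

-- ===== LEMMAS AND PROOFS =====

-- invariant tying A's running (best-count, best-text) pair for owner i to B's dict entry at i
theorem bestChirps_inv (cd : List (Int × Int × String × List String × List Int × List Int)) (i : Int) :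
    ∀ (d : PySem.Dict Int (Int × String)) (es : Int × Option String),
      ((d.get? i).map (fun p => p.1) = some es.1 ∨ ((d.get? i) = none ∧ es.1 = 0)) →
      es.2 = (d.get? i).map (fun p => p.2) →
      (cd.foldl
        (fun (es : Int × Option String) kv =>
          if i == kv.2.1 then
            if (kv.2.2.2.2.1.length : Int) ≥ es.1 then ((kv.2.2.2.2.1.length : Int), some kv.2.2.1)
            else es
          else es) es).2
      = ((cd.foldl
          (fun d kv =>
            match d.get? kv.2.1 with
            | some cur =>
              if (kv.2.2.2.2.1.length : Int) ≥ cur.1 then d.insert kv.2.1 ((kv.2.2.2.2.1.length : Int), kv.2.2.1)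
              else d
            | none => d.insert kv.2.1 ((kv.2.2.2.2.1.length : Int), kv.2.2.1)) d).get? i).map (fun p => p.2) := by
  induction cd with
  | nil =>
    intro d es _ h2
    simpa using h2
  | cons kv rest ih =>
    intro d es h1 h2
    simp only [List.foldl_cons]
    by_cases hio : i = kv.2.1
    · have hci : d.get? i = d.get? kv.2.1 := by rw [hio]
      have hins : ∀ v : Int × String, (d.insert kv.2.1 v).get? i = some v := by
        intro v; rw [hio]; simp [PySem.Dict.get?_insert_self]
      rw [if_pos (by simp [hio])]
      cases hcur : d.get? kv.2.1 with
      | none =>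
        rcases h1 with h1 | ⟨-, he⟩
        · rw [hci, hcur] at h1; simp at h1
        · rw [hci, hcur] at h2; simp only [Option.map_none] at h2
          rw [if_pos (by rw [he]; positivity)]
          apply ih
          · left; rw [hins]; rfl
          · rw [hins]; rfl
      | some cur =>
        rcases h1 with h1 | ⟨hn, -⟩
        · have hc1 : cur.1 = es.1 := by
            rw [hci, hcur, Option.map_some] at h1; exact Option.some.inj h1
          dsimp only
          by_cases hge : ((kv.2.2.2.2.1.length : Int) ≥ cur.1)
          · rw [if_pos (hc1 ▸ hge), if_pos hge]
            apply ih
            · left; rw [hins]; rfl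
            · rw [hins]; rfl
          · rw [if_neg (hc1 ▸ hge), if_neg hge]
            exact ih d es (Or.inl h1) h2
        · rw [hci, hcur] at hn; simp at hn
    · rw [if_neg (by simp [hio])]
      have key : ∀ v : Int × String, (d.insert kv.2.1 v).get? i = d.get? i :=
        fun v => PySem.Dict.get?_insert_of_ne d v hio
      cases hcur : d.get? kv.2.1 with
      | none =>
        apply ih
        · rw [key]; exact h1
        · rw [key]; exact h2
      | some cur =>
        dsimp only
        by_cases hge : ((kv.2.2.2.2.1.length : Int) ≥ cur.1)
        · rw [if_pos hge]
          apply ih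
          · rw [key]; exact h1
          · rw [key]; exact h2
        · rw [if_neg hge]
          exact ih d es h1 h2

theorem top_chirp_eq (cd : List (Int × Int × String × List String × List Int × List Int)) (i : Int) :
    top_chirp cd i = ((bestChirps cd).get? i).map (fun p => p.2) := by
  unfold top_chirp bestChirps
  exact bestChirps_inv cd i PySem.Dict.empty (0, none)
    (Or.inr ⟨by simp [PySem.Dict.get?_empty], rfl⟩)
    (by simp [PySem.Dict.get?_empty])

-- A's inner append loop over the followed users equals B's filterMap over the index
theorem inner_fold (cd : List (Int × Int × String × List String × List Int × List Int)) (l : List Int) :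
    ∀ acc : List String,
      l.foldl (fun lst i =>
        match top_chirp cd i with
        | some s => lst ++ [s]
        | none => lst) acc
      = acc ++ l.filterMap (fun i => ((bestChirps cd).get? i).map (fun p => p.2)) := by
  induction l with
  | nil => intro acc; simp
  | cons x t ih =>
    intro acc
    simp only [List.foldl_cons, List.filterMap_cons]
    rw [top_chirp_eq cd x]
    cases h : ((bestChirps cd).get? x).map (fun p => p.2) with
    | none => rw [ih]
    | some s => rw [ih, List.append_assoc]; rfl

-- with unique keys, the first-match lookup characterises the filter by key
theorem filter_key_of_get? (pd : List (Int × String × List Int × List Int)) (uid : Int)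
    (hn : (pd.map (·.1)).Nodup) :
    (∀ prof, (PySem.Dict.mk pd).get? uid = some prof →
        pd.filter (fun kv => kv.1 == uid) = [(uid, prof)])
    ∧ ((PySem.Dict.mk pd).get? uid = none → pd.filter (fun kv => kv.1 == uid) = []) := by
  induction pd with
  | nil => exact ⟨fun prof h => by simp [PySem.Dict.get?] at h, fun _ => rfl⟩
  | cons kv rest ih =>
    simp only [List.map_cons, List.nodup_cons] at hn
    obtain ⟨hnotin, hnd⟩ := hn
    have ihr := ih hnd
    constructor
    · intro prof h
      rw [PySem.Dict.get?_mk_cons] at h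
      by_cases hk : kv.1 = uid
      · rw [if_pos (by simp [hk])] at h
        have hprof : kv.2 = prof := Option.some.inj h
        have hrest : rest.filter (fun kv => kv.1 == uid) = [] := by
          rw [List.filter_eq_nil_iff]
          intro a ha hbeq
          refine hnotin ?_
          have : a.1 = uid := by simpa using hbeq
          rw [← hk] at this
          rw [← this]
          exact List.mem_map_of_mem ha
        rw [List.filter_cons, if_pos (by simp [hk]), hrest, ← hk, ← hprof]
      · rw [if_neg (by simp [hk])] at h
        rw [List.filter_cons, if_neg (by simp [hk])]
        exact ihr.1 prof h
    · intro h
      rw [PySem.Dict.get?_mk_cons] at h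
      by_cases hk : kv.1 = uid
      · rw [if_pos (by simp [hk])] at h; exact absurd h (by simp)
      · rw [if_neg (by simp [hk])] at h
        rw [List.filter_cons, if_neg (by simp [hk])]
        exact ihr.2 h

-- ===== VERDICT (by name: the statement is the Claim_ definition above) =====
theorem get_top_chirps_spec : Claim_equal_get_top_chirps := by
  intro pd cd uid _ hpre
  unfold Spec_get_top_chirps get_top_chirps get_top_chirps_alt
  cases hlook : (PySem.Dict.mk pd).get? uid with
  | none =>
    dsimp only
    simp only [ite_self]
    rw [PySem.List.foldl_ignore]
  | some prof =>
    dsimp only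
    have hstep : ∀ (acc : List String) (kv : Int × String × List Int × List Int), kv ∈ pd →
        (if kv.1 == uid then
          prof.2.2.foldl (fun lst i =>
            match top_chirp cd i with
            | some s => lst ++ [s]
            | none => lst) acc
        else acc)
        = (if kv.1 == uid then
            acc ++ prof.2.2.filterMap (fun i => ((bestChirps cd).get? i).map (fun p => p.2))
          else acc) := by
      intro acc kv _
      by_cases hk : (kv.1 == uid) = true
      · rw [if_pos hk, if_pos hk, inner_fold]
      · rw [if_neg hk, if_neg hk]
    rw [PySem.List.foldl_congr_mem pd _ _ _ hstep]
    rw [PySem.List.foldl_if_eq_foldl_filter]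
    rw [(filter_key_of_get? pd uid hpre.1).1 prof hlook]
    simp
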